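-- pv_equiv track=rewrite | github.com/Rewat05/Artificial-Intelligence-Lab-Group-ALTUS | Lab 1/rabbit_leap_dfs.py | dfs
-- ===== SOURCE A (Python) =====
-- def is_goal_state(state):
--     return state == "EEE_WWW"
--
-- def get_successors(state):
--     successors = []
--     empty_index = state.index('_')
--     possible_moves = [
--         (empty_index - 1, empty_index),  # Move left
--         (empty_index + 1, empty_index),  # Move right
--         (empty_index - 2, empty_index),  # Jump left
--         (empty_index + 2, empty_index)   # Jump right
--     ]
--
--     for move in possible_moves:
--         if 0 <= move[0] < len(state):
--             new_state = list(state)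
--             new_state[empty_index], new_state[move[0]] = new_state[move[0]], new_state[empty_index]
--             successors.append(''.join(new_state))
--
--     return successors
--
-- def dfs(start_state):
--     stack = [(start_state, [])]
--     visited = set()
--     while stack:
--         (state, path) = stack.pop()
--         if state in visited:
--             continue
--         visited.add(state)
--         path = path + [state]
--         if is_goal_state(state):
--             return path
--         for successor in get_successors(state):
--             stack.append((successor, path))
--     return None
-- ===== SOURCE B (Python) =====
-- def is_goal_state(state):
--     return state == "EEE_WWW"
--
-- def _successors(state):
--     i = state.index('_')
--     n = len(state)
--
--     def swap(j):
--         cs = list(state)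
--         cs[i], cs[j] = cs[j], cs[i]
--         return ''.join(cs)
--
--     return [swap(j) for j in (i - 1, i + 1, i - 2, i + 2) if 0 <= j < n]
--
-- def dfs(start_state):
--     # Backtracking DFS: one shared path, a stack of candidate frames (tried
--     # from the back, i.e. in A's pop order), visited checked at entry.
--     visited = set()
--     path = []
--     frames = [[start_state]]
--     while frames:
--         frame = frames[-1]
--         if not frame:
--             frames.pop()
--             if path:
--                 path.pop()
--             continue
--         state = frame.pop()
--         if state in visited:
--             continue
--         visited.add(state)
--         path.append(state)
--         if is_goal_state(state):
--             return path
--         frames.append(_successors(state))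
--     return None
-- ===== Notes on version B (the rewrite author's own statement) =====
-- stated objective: faster
-- what changed: A's stack of (state, path-copy) pairs with the visited check deferred to pop time is replaced by a backtracking DFS: one shared path plus a stack of candidate frames tried from the back, visited checked at entry, so no path copies are ever made.
import Mathlib
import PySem

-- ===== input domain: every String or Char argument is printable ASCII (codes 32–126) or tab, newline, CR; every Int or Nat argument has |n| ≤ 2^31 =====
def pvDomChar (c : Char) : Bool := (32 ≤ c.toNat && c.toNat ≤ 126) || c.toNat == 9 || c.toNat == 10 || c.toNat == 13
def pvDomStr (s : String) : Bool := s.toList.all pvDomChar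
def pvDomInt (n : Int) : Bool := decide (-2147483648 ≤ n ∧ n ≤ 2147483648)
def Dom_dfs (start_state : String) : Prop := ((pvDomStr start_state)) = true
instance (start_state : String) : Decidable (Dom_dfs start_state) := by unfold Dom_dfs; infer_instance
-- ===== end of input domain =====

-- B replaces A's explicit stack of (state, path-copy) pairs by a backtracking DFS over one shared path with candidate frames (visited checked at entry); it avoids A's per-push path copies.


-- ===== PORT A =====
def is_goal_state (state : String) : Bool := state == "EEE_WWW"

-- state.index of the underscore raises ValueError when none is present; Pre_dfs guarantees presence, so
-- PySem.Str.find (exact where the substring occurs) stands in for it; the swap's list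
-- indices are in range whenever '_' occurs, so List.getD/.toNat are exact there.
def get_successors (state : String) : List String :=
  let cs := state.toList
  let empty_index : Int := PySem.Str.find state "_"
  let possible_moves : List (Int × Int) :=
    [(empty_index - 1, empty_index), (empty_index + 1, empty_index),
     (empty_index - 2, empty_index), (empty_index + 2, empty_index)]
  possible_moves.foldl (fun successors move =>
    if 0 ≤ move.1 ∧ move.1 < (cs.length : Int) then
      successors ++ [String.ofList ((cs.set empty_index.toNat (cs.getD move.1.toNat ' ')).set
        move.1.toNat (cs.getD empty_index.toNat ' '))]
    else successors) []

-- A's while loop; the stack is a list with its head as the top (list.pop() pops the end),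
-- so pushing the successors in order is reversing them onto the front.  The fuel argument
-- is only a totality device: it ticks once per pop and with the fuel dfs supplies
-- (more than one tick per possible push) it never runs out.
def dfsLoop : Nat → List (String × List String) → PySem.Set String → Option (List String)
  | _, [], _ => none
  | 0, _ :: _, _ => none
  | fuel + 1, (state, path) :: rest, visited =>
    if PySem.Set.contains visited state then dfsLoop fuel rest visited
    else
      let visited' := PySem.Set.add visited state
      let path' := path ++ [state]
      if is_goal_state state then some path'
      else dfsLoop fuel (((get_successors state).map (fun s => (s, path'))).reverse ++ rest) visited'

def dfs (start_state : String) : Option (List String) :=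
  dfsLoop (1 + 4 * Nat.factorial start_state.length) [(start_state, [])] PySem.Set.empty

-- ===== PORT B =====
def is_goal_state_alt (state : String) : Bool := state == "EEE_WWW"

def successors_alt (state : String) : List String :=
  let cs := state.toList
  let i : Int := PySem.Str.find state "_"
  let n : Int := (cs.length : Int)
  ([i - 1, i + 1, i - 2, i + 2].filter (fun j => decide (0 ≤ j ∧ j < n))).map (fun j =>
    String.ofList ((cs.set i.toNat (cs.getD j.toNat ' ')).set j.toNat (cs.getD i.toNat ' ')))

-- Source B's while loop over (frames, path, visited), frames head = top frame.
-- frame.pop() takes the LAST candidate ((c::cs).getLastD c / dropLast); 'if path: path.pop()'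
-- is path.dropLast.  The fuel is only a totality device: it ticks once per popped candidate
-- (the backtracking step shortens frames instead) and dfs_alt supplies enough to never run out.
def dfsGo : Nat → List (List String) → List String → PySem.Set String → Option (List String)
  | _, [], _, _ => none
  | fuel, [] :: fs, path, visited => dfsGo fuel fs path.dropLast visited
  | 0, (_ :: _) :: _, _, _ => none
  | fuel + 1, (c :: cs) :: fs, path, visited =>
    let state := cs.getLastD c
    let rest := (c :: cs).dropLast
    if PySem.Set.contains visited state then dfsGo fuel (rest :: fs) path visited
    else
      let visited' := PySem.Set.add visited state
      let path' := path ++ [state]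
      if is_goal_state_alt state then some path'
      else dfsGo fuel (successors_alt state :: rest :: fs) path' visited'
  termination_by fuel frames _ _ => (fuel, frames.length)
  decreasing_by
    · simp [Prod.lex_iff]
    · simp [Prod.lex_iff]
    · simp [Prod.lex_iff]

def dfs_alt (start_state : String) : Option (List String) :=
  dfsGo (1 + 4 * Nat.factorial start_state.length) [[start_state]] [] PySem.Set.empty

-- ===== PRECONDITION & SPEC =====
-- Pre_dfs excludes exactly the inputs on which the Python A raises: start_state.index of the
-- underscore character raises ValueError when start_state contains no underscore.
def Pre_dfs (start_state : String) : Prop := '_' ∈ start_state.toList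
instance (start_state : String) : Decidable (Pre_dfs start_state) := by unfold Pre_dfs; infer_instance
def pvWitness_dfs : String := "WW_EE"

def Spec_dfs (start_state : String) (out : Option (List String)) : Prop := out = dfs_alt start_state
instance (start_state : String) (out : Option (List String)) : Decidable (Spec_dfs start_state out) := by unfold Spec_dfs; infer_instance

-- ===== CLAIM (what is proved, stated in full; the proofs are below) =====
def Claim_equal_dfs : Prop := ∀ (start_state : String), Dom_dfs start_state → Pre_dfs start_state → Spec_dfs start_state (dfs start_state)

-- ===== LEMMAS AND PROOFS =====

theorem goal_alt_eq : is_goal_state_alt = is_goal_state := rfl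

theorem succs_alt_eq (s : String) : successors_alt s = get_successors s := by
  simp only [successors_alt, get_successors]
  rw [PySem.List.foldl_append_ite
    (p := fun m : Int × Int => 0 ≤ m.1 ∧ m.1 < (s.toList.length : Int))]
  rw [show [(PySem.Str.find s "_" - 1, PySem.Str.find s "_"),
        (PySem.Str.find s "_" + 1, PySem.Str.find s "_"),
        (PySem.Str.find s "_" - 2, PySem.Str.find s "_"),
        (PySem.Str.find s "_" + 2, PySem.Str.find s "_")] =
      [PySem.Str.find s "_" - 1, PySem.Str.find s "_" + 1,
        PySem.Str.find s "_" - 2, PySem.Str.find s "_" + 2].map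
        (fun j => (j, PySem.Str.find s "_")) from rfl]
  rw [List.filter_map, List.map_map]
  rfl

theorem dfsLoop_nil (fuel : Nat) (v : PySem.Set String) : dfsLoop fuel [] v = none := by
  cases fuel <;> rfl

theorem dfsLoop_zero (st : List (String × List String)) (v : PySem.Set String) :
    dfsLoop 0 st v = none := by
  cases st with
  | nil => rfl
  | cons h t => cases h; rfl

-- A's stack, reconstructed from B's frames and shared path: each frame holds the
-- still-untried candidates (tried back to front) of the corresponding path prefix.
def conv : List (List String) → List String → List (String × List String)
  | [], _ => []
  | f :: fs, p => f.reverse.map (fun c => (c, p)) ++ conv fs p.dropLast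

theorem reverse_cons_getLastD {α : Type} (c : α) (cs : List α) :
    (c :: cs).reverse = cs.getLastD c :: ((c :: cs).dropLast).reverse := by
  have h : (c :: cs) ≠ [] := by simp
  conv_lhs => rw [← List.dropLast_append_getLast h]
  rw [List.reverse_append]
  simp [List.getLast_eq_getLastD]

-- the simulation: B's loop equals A's loop on the reconstructed stack, fuel in lockstep
-- (both tick exactly once per candidate popped).
theorem dfs_sim (fuel : Nat) :
    ∀ (frames : List (List String)) (path : List String) (v : PySem.Set String),
      dfsGo fuel frames path v = dfsLoop fuel (conv frames path) v := by
  induction fuel using Nat.strong_induction_on with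
  | _ fuel IH =>
    intro frames
    induction frames with
    | nil => intro path v; rw [dfsGo, conv, dfsLoop_nil]
    | cons frame fs ihf =>
      intro path v
      cases frame with
      | nil =>
        rw [dfsGo, conv]
        simpa using ihf path.dropLast v
      | cons c cs =>
        cases fuel with
        | zero => rw [dfsLoop_zero]; rw [dfsGo]
        | succ f =>
          rw [dfsGo, conv, reverse_cons_getLastD, List.map_cons, List.cons_append, dfsLoop,
            goal_alt_eq]
          dsimp only
          split_ifs with h1 h2
          · rw [IH f (Nat.lt_succ_self f), conv]
          · rfl
          · rw [IH f (Nat.lt_succ_self f)]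
            rw [conv, conv, succs_alt_eq, List.dropLast_concat, ← List.map_reverse]

-- ===== VERDICT (by name: the statement is the Claim_ definition above) =====
theorem dfs_spec : Claim_equal_dfs := by
  intro start_state _ _
  unfold Spec_dfs dfs dfs_alt
  rw [dfs_sim]
  rw [show conv [[start_state]] [] = [(start_state, [])] from rfl]
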